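-- pv_equiv track=rewrite | github.com/wisest30/AlgoStudy | source/leetcode/1599/hyoseong.py | minOperationsMaxProfit
-- ===== SOURCE A (Python) =====
-- from typing import List
--
-- def minOperationsMaxProfit(customers: List[int], boardingCost: int, runningCost: int) -> int:
--     cur = 0
--     A = [0]
--     for i in range(len(customers)) :
--         cur += customers[i]
--         x = min(4, cur)
--         cur -= x
--         A.append(A[-1] + x * boardingCost - runningCost)
--     while cur :
--         x = min(4, cur)
--         cur -= x
--         A.append(A[-1] + x * boardingCost - runningCost)
--
--     idx = -1
--     max_val = 0
--     for i in range(len(A)) :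
--         if A[i] > max_val :
--             idx = i
--             max_val = A[i]
--     return idx
-- ===== SOURCE B (Python) =====
-- def _tail_best(boardingCost, runningCost, waiting, profit, best, idx, i):
--     # remaining rotations are arithmetic: q full-4 steps then one partial step
--     d = 4 * boardingCost - runningCost
--     q, rem = divmod(waiting, 4)
--     if q > 0 and d > 0 and profit + q * d > best:
--         best, idx = profit + q * d, i + q
--     if rem > 0 and profit + q * d + rem * boardingCost - runningCost > best:
--         idx = i + q + 1
--     return idx
--
-- def minOperationsMaxProfit(customers, boardingCost, runningCost):
--     waiting = 0
--     profit = 0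
--     best = 0
--     idx = -1
--     i = 0
--     for c in customers:
--         waiting += c
--         x = min(4, waiting)
--         waiting -= x
--         profit += x * boardingCost - runningCost
--         i += 1
--         if profit > best:
--             best, idx = profit, i
--     return _tail_best(boardingCost, runningCost, waiting, profit, best, idx, i)
-- ===== Notes on version B (the rewrite author's own statement) =====
-- stated objective: faster
-- what changed: B drops A's profit-history list and its rotation-by-rotation drain of the leftover queue: one pass over customers keeps a running (best, idx), and the remaining waiting people are handled in closed form (q = waiting//4 full rotations form an arithmetic progression whose max is at its end when 4*boardingCost-runningCost > 0, plus one partial rotation), so no per-rotation loop over sum(customers)/4 steps.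
import Mathlib
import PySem

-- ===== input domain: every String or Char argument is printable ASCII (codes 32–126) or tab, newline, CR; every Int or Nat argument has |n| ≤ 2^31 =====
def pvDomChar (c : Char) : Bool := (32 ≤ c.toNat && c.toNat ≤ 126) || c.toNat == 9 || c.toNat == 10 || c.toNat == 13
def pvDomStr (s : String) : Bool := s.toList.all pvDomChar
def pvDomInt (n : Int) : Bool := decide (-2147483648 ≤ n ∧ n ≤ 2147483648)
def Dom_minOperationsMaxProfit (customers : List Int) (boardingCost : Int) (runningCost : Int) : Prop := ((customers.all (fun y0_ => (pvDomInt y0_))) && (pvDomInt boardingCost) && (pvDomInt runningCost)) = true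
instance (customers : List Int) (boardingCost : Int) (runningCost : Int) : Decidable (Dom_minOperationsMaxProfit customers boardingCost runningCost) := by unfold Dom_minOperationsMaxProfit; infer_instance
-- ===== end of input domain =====

-- B replaces A's O(total/4) drain-the-queue simulation by a closed-form treatment of the
-- tail arithmetic progression (objective: faster, asymptotic).


-- ===== PORT A =====
-- A[-1] of the (always non-empty) profit list
def pvLastA (l : List Int) : Int := l.getLastD 0

-- A's first for-loop: state (cur, A)
def pvForA (bc rc : Int) : List Int → Int × List Int → Int × List Int
  | [], st => st
  | c :: cs, (cur, A) =>
      let cur1 := cur + c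
      let x := min 4 cur1
      let cur2 := cur1 - x
      pvForA bc rc cs (cur2, A ++ [pvLastA A + x * bc - rc])

-- A's while loop ("while cur:")
def pvWhileA (bc rc : Int) (cur : Int) (A : List Int) : List Int :=
  if cur ≠ 0 then
    let x := min 4 cur
    pvWhileA bc rc (cur - x) (A ++ [pvLastA A + x * bc - rc])
  else A
termination_by cur.natAbs
decreasing_by simp only [min_def]; split <;> omega

-- A's final scan: (idx, max_val) over the list with running index i
def pvScanA : List Int → Int → Int → Int → Int × Int
  | [], _, idx, mx => (idx, mx)
  | a :: rest, i, idx, mx =>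
      if a > mx then pvScanA rest (i + 1) i a else pvScanA rest (i + 1) idx mx

def minOperationsMaxProfit (customers : List Int) (boardingCost : Int) (runningCost : Int) : Int :=
  let r := pvForA boardingCost runningCost customers (0, [0])
  let A := pvWhileA boardingCost runningCost r.1 r.2
  (pvScanA A 0 (-1) 0).1

-- ===== PORT B =====
-- Source B's _tail_best: closed form for the drain phase
def pvTailB (bc rc w p best idx i : Int) : Int :=
  let d := 4 * bc - rc
  let q := PySem.Int.floordiv w 4
  let rem := PySem.Int.mod w 4
  let best1 := if 0 < q ∧ 0 < d ∧ best < p + q * d then p + q * d else best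
  let idx1 := if 0 < q ∧ 0 < d ∧ best < p + q * d then i + q else idx
  if 0 < rem ∧ best1 < p + q * d + rem * bc - rc then i + q + 1 else idx1

-- Source B's single pass over customers: state (waiting, profit, best, idx, i)
def pvForB (bc rc : Int) : List Int → Int × Int × Int × Int × Int → Int × Int × Int × Int × Int
  | [], st => st
  | c :: cs, (w, p, best, idx, i) =>
      let w1 := w + c
      let x := min 4 w1
      let w2 := w1 - x
      let p1 := p + x * bc - rc
      let i1 := i + 1
      if p1 > best then pvForB bc rc cs (w2, p1, p1, i1, i1)
      else pvForB bc rc cs (w2, p1, best, idx, i1)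

def minOperationsMaxProfit_alt (customers : List Int) (boardingCost : Int) (runningCost : Int) : Int :=
  let s := pvForB boardingCost runningCost customers (0, 0, 0, -1, 0)
  pvTailB boardingCost runningCost s.1 s.2.1 s.2.2.1 s.2.2.2.1 s.2.2.2.2

-- ===== PRECONDITION & SPEC =====
def Spec_minOperationsMaxProfit (customers : List Int) (boardingCost : Int) (runningCost : Int) (out : Int) : Prop := out = minOperationsMaxProfit_alt customers boardingCost runningCost
instance (customers : List Int) (boardingCost : Int) (runningCost : Int) (out : Int) : Decidable (Spec_minOperationsMaxProfit customers boardingCost runningCost out) := by unfold Spec_minOperationsMaxProfit; infer_instance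

-- ===== CLAIM (what is proved, stated in full; the proofs are below) =====
def Claim_equal_minOperationsMaxProfit : Prop := ∀ (customers : List Int) (boardingCost : Int) (runningCost : Int), Dom_minOperationsMaxProfit customers boardingCost runningCost → Spec_minOperationsMaxProfit customers boardingCost runningCost (minOperationsMaxProfit customers boardingCost runningCost)

-- ===== LEMMAS AND PROOFS =====

-- scan over an appended element
theorem pvScanA_append (l : List Int) (a : Int) : ∀ (i idx mx : Int),
    pvScanA (l ++ [a]) i idx mx =
      if a > (pvScanA l i idx mx).2 then (i + (l.length : Int), a) else pvScanA l i idx mx := by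
  induction l with
  | nil => intro i idx mx; simp [pvScanA]
  | cons b t ih =>
      intro i idx mx
      simp only [List.cons_append, pvScanA]
      have harith : i + ((t.length : Int) + 1) = i + 1 + (t.length : Int) := by ring
      by_cases hb : b > mx <;> simp [hb, ih, harith]

-- initial max is a lower bound of the scan's max
theorem pvScanA_init_le (l : List Int) : ∀ (i idx mx : Int), mx ≤ (pvScanA l i idx mx).2 := by
  induction l with
  | nil => intro i idx mx; simp [pvScanA]
  | cons b t ih =>
      intro i idx mx
      simp only [pvScanA]
      by_cases hb : b > mx
      · simpa [hb] using le_trans (le_of_lt hb) (ih (i+1) i b)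
      · simpa [hb] using ih (i+1) idx mx

-- every element is a lower bound of the scan's max
theorem pvScanA_mem_le (l : List Int) : ∀ (i idx mx a : Int), a ∈ l → a ≤ (pvScanA l i idx mx).2 := by
  induction l with
  | nil => intro _ _ _ _ h; simp at h
  | cons b t ih =>
      intro i idx mx a h
      rcases List.mem_cons.1 h with h | h
      · subst h
        simp only [pvScanA]
        by_cases hb : a > mx
        · simpa [hb] using pvScanA_init_le t (i+1) i a
        · have : a ≤ mx := le_of_not_gt hb
          simpa [hb] using le_trans this (pvScanA_init_le t (i+1) idx mx)
      · simp only [pvScanA]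
        by_cases hb : b > mx <;> simp [hb, ih _ _ _ _ h]

theorem pvLastA_mem (l : List Int) (h : l ≠ []) : pvLastA l ∈ l := by
  unfold pvLastA
  rw [List.getLastD_eq_getLast?, List.getLast?_eq_some_getLast h]
  simp [List.getLast_mem]

theorem pvLastA_append (l : List Int) (a : Int) : pvLastA (l ++ [a]) = a := by
  simp [pvLastA]

-- cur stays ≥ 0 through A's arrival loop
theorem pvForA_nonneg (bc rc : Int) : ∀ (cs : List Int) (w : Int) (A : List Int),
    0 ≤ w → 0 ≤ (pvForA bc rc cs (w, A)).1 := by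
  intro cs
  induction cs with
  | nil => intro w A h; simpa [pvForA] using h
  | cons c t ih =>
      intro w A h
      simp only [pvForA]
      exact ih _ _ (by simp [min_def]; split <;> omega)

-- the arrival loop never empties the list
theorem pvForA_ne_nil (bc rc : Int) : ∀ (cs : List Int) (w : Int) (A : List Int),
    A ≠ [] → (pvForA bc rc cs (w, A)).2 ≠ [] := by
  intro cs
  induction cs with
  | nil => intro w A h; simpa [pvForA] using h
  | cons c t ih =>
      intro w A h
      simp only [pvForA]
      exact ih _ _ (by simp)

-- B's arrival loop tracks A's: same waiting, last profit, and the scan of A's list so far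
theorem pvFor_agree (bc rc : Int) : ∀ (cs : List Int) (w : Int) (A : List Int), A ≠ [] →
    pvForB bc rc cs (w, pvLastA A, (pvScanA A 0 (-1) 0).2, (pvScanA A 0 (-1) 0).1, (A.length : Int) - 1)
      = ((pvForA bc rc cs (w, A)).1, pvLastA (pvForA bc rc cs (w, A)).2,
         (pvScanA (pvForA bc rc cs (w, A)).2 0 (-1) 0).2,
         (pvScanA (pvForA bc rc cs (w, A)).2 0 (-1) 0).1,
         ((pvForA bc rc cs (w, A)).2.length : Int) - 1) := by
  intro cs
  induction cs with
  | nil => intro w A _; simp [pvForA, pvForB]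
  | cons c t ih =>
      intro w A hA
      simp only [pvForA, pvForB]
      set v := pvLastA A + min 4 (w + c) * bc - rc with hv
      have key := ih (w + c - min 4 (w + c)) (A ++ [v]) (by simp)
      rw [pvLastA_append, pvScanA_append] at key
      have hn1 : ((A.length : Int)) - 1 + 1 = (A.length : Int) := by omega
      have hn2 : ((A.length : Int)) + 1 - 1 = (A.length : Int) := by omega
      simp only [zero_add, List.length_append, List.length_cons, List.length_nil,
        Nat.cast_add, Nat.cast_one, hn2] at key
      rw [hn1]
      by_cases hgt : v > (pvScanA A 0 (-1) 0).2
      · rw [if_pos hgt]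
        rw [if_pos hgt] at key
        exact key
      · rw [if_neg hgt]
        rw [if_neg hgt] at key
        exact key

-- the closed-form tail step absorbs one full-4 drain rotation
theorem pvTailB_step (bc rc cur p best idx n : Int) (h4 : 4 ≤ cur) (hpb : p ≤ best) :
    pvTailB bc rc cur p best idx n
      = pvTailB bc rc (cur - 4) (p + (4 * bc - rc))
          (if p + (4 * bc - rc) > best then p + (4 * bc - rc) else best)
          (if p + (4 * bc - rc) > best then n + 1 else idx) (n + 1) := by
  have hq4 : PySem.Int.floordiv cur 4 = cur / 4 :=
    PySem.Int.floordiv_eq_ediv_of_pos (by norm_num)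
  have hq4' : PySem.Int.floordiv (cur - 4) 4 = (cur - 4) / 4 :=
    PySem.Int.floordiv_eq_ediv_of_pos (by norm_num)
  have hm4 : PySem.Int.mod cur 4 = cur % 4 :=
    PySem.Int.mod_eq_emod_of_pos (by norm_num)
  have hm4' : PySem.Int.mod (cur - 4) 4 = (cur - 4) % 4 :=
    PySem.Int.mod_eq_emod_of_pos (by norm_num)
  simp only [pvTailB, hq4, hq4', hm4, hm4']
  have hq' : (cur - 4) / 4 = cur / 4 - 1 := by omega
  have hr' : (cur - 4) % 4 = cur % 4 := by omega
  rw [hq', hr']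
  set q := cur / 4 with hqd
  set r := cur % 4 with hrd
  have hq1 : 1 ≤ q := by omega
  have hval : p + (4 * bc - rc) + (q - 1) * (4 * bc - rc) = p + q * (4 * bc - rc) := by ring
  have hi1 : n + 1 + (q - 1) = n + q := by ring
  rw [hval, hi1]
  set d := 4 * bc - rc with hdd
  set F := p + q * d + r * bc - rc with hFd
  set P := p + q * d with hPd
  by_cases hd : 0 < d
  · have hA : p + d ≤ P := by nlinarith
    by_cases hq2 : 2 ≤ q
    · have hB : p + d < P := by nlinarith
      split_ifs <;> omega
    · have hq1' : q = 1 := by omega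
      have hB : P = p + d := by rw [hPd, hq1']; ring
      split_ifs <;> omega
  · have hA : P ≤ p := by nlinarith
    split_ifs <;> omega

-- A's drain loop followed by the scan equals B's closed-form tail
theorem pvWhileA_zero (bc rc : Int) (A : List Int) : pvWhileA bc rc 0 A = A := by
  rw [pvWhileA]; simp

theorem pvTail_agree (bc rc : Int) : ∀ (k : Nat) (cur : Int) (A : List Int),
    cur.natAbs = k → 0 ≤ cur → A ≠ [] →
    (pvScanA (pvWhileA bc rc cur A) 0 (-1) 0).1
      = pvTailB bc rc cur (pvLastA A) (pvScanA A 0 (-1) 0).2 (pvScanA A 0 (-1) 0).1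
          ((A.length : Int) - 1) := by
  intro k
  induction k using Nat.strong_induction_on with
  | _ k ih =>
    intro cur A hk hnn hA
    by_cases h0 : cur = 0
    · subst h0
      rw [pvWhileA_zero]
      simp [pvTailB]
    · have hpos : 0 < cur := lt_of_le_of_ne hnn (Ne.symm h0)
      rw [pvWhileA]
      simp only [ne_eq, h0, not_false_eq_true, if_pos]
      by_cases h4 : cur < 4
      · -- partial final rotation: min 4 cur = cur, drain ends
        have hx : min 4 cur = cur := by omega
        rw [hx]
        have hnext : cur - cur = 0 := by omega
        rw [hnext, pvWhileA_zero, pvScanA_append]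
        have hq : PySem.Int.floordiv cur 4 = 0 := by
          rw [PySem.Int.floordiv_eq_ediv_of_pos (by norm_num : (0:Int) < 4)]; omega
        have hr : PySem.Int.mod cur 4 = cur := by
          rw [PySem.Int.mod_eq_emod_of_pos (by norm_num : (0:Int) < 4)]; omega
        simp only [pvTailB, hq, hr, zero_mul, add_zero, lt_irrefl, false_and,
          if_false, hpos, true_and]
        by_cases hgt : pvLastA A + cur * bc - rc > (pvScanA A 0 (-1) 0).2
        · rw [if_pos hgt, if_pos (by omega : (pvScanA A 0 (-1) 0).2 < pvLastA A + cur * bc - rc)]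
          simp
        · rw [if_neg hgt, if_neg (by omega : ¬ (pvScanA A 0 (-1) 0).2 < pvLastA A + cur * bc - rc)]
      · -- full rotation of 4; recurse
        have hx : min 4 cur = 4 := by omega
        rw [hx]
        have hklt : (cur - 4).natAbs < k := by omega
        have hrec := ih _ hklt (cur - 4) (A ++ [pvLastA A + 4 * bc - rc]) rfl (by omega) (by simp)
        rw [hrec, pvLastA_append, pvScanA_append]
        have hpb : pvLastA A ≤ (pvScanA A 0 (-1) 0).2 :=
          pvScanA_mem_le A 0 (-1) 0 _ (pvLastA_mem A hA)
        have hstep := pvTailB_step bc rc cur (pvLastA A) (pvScanA A 0 (-1) 0).2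
          (pvScanA A 0 (-1) 0).1 ((A.length : Int) - 1) (by omega) hpb
        rw [hstep]
        have hlen : ((A ++ [pvLastA A + 4 * bc - rc]).length : Int) - 1 = ((A.length : Int) - 1) + 1 := by
          simp
        rw [hlen]
        have hv : pvLastA A + (4 * bc - rc) = pvLastA A + 4 * bc - rc := by ring
        rw [hv]
        by_cases hgt : pvLastA A + 4 * bc - rc > (pvScanA A 0 (-1) 0).2
        · rw [if_pos hgt, if_pos hgt]
          have h01 : (0 : Int) + (A.length : Int) = ((A.length : Int) - 1) + 1 := by omega
          rw [h01]
          simp [hgt]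
        · rw [if_neg hgt, if_neg hgt]
          simp [hgt]

-- ===== VERDICT (by name: the statement is the Claim_ definition above) =====
theorem minOperationsMaxProfit_spec : Claim_equal_minOperationsMaxProfit := by
  intro customers bc rc _
  unfold Spec_minOperationsMaxProfit minOperationsMaxProfit minOperationsMaxProfit_alt
  have h0 : ([0] : List Int) ≠ [] := by simp
  have hfor := pvFor_agree bc rc customers 0 [0] h0
  have hinit1 : pvLastA [0] = 0 := by decide
  have hinit2 : pvScanA [0] 0 (-1) 0 = (-1, 0) := by decide
  have hinit3 : (([0] : List Int).length : Int) - 1 = 0 := by decide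
  rw [hinit1, hinit2, hinit3] at hfor
  simp only [hfor]
  have hnn := pvForA_nonneg bc rc customers 0 [0] le_rfl
  have hne := pvForA_ne_nil bc rc customers 0 [0] h0
  exact pvTail_agree bc rc _ _ _ rfl hnn hne
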